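-- pv_equiv track=rewrite | github.com/TanelPaal/Programming-Introductory-Course | ExtraMaterial/test2.py | add_symbols
-- ===== SOURCE A (Python) =====
-- def add_symbols(string: str, symbols: str) -> str:
--     """
--     Return given string with added symbols where needed.
--
--     If letter in string exists in symbols, double it in result.
--     If number in string exists in symbols, triple it in result.
--
--     It does not change the result when any symbol appears more than once in symbols.
--
--     add_symbols("ab12", "b12a") -> "aabb111222"
--     add_symbols("xyz", "xxxxxx") -> "xxyz"
--     add_symbols("aaaa", "b") -> "aaaa"
--     add_symbols("aab", "a") -> "aaaab"
--     """
--     result = []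
--
--     for char in string:
--         if char.isalpha() and char in symbols:  # Check if the character is a letter and in symbols
--             result.append(char * 2)  # Double the character
--         elif char.isdigit() and char in symbols:  # Check if the character is a number and in symbols
--             result.append(char * 3)  # Triple the character
--         else:
--             result.append(char)  # Include the character as-is
--
--     return ''.join(result)
-- ===== SOURCE B (Python) =====
-- def add_symbols(string: str, symbols: str) -> str:
--     """Edit the whole string by one str.replace pass per distinct symbol.
--
--     Replacements for distinct characters commute (each pass only touches its
--     own character, and the replacement text consists of that character only),
--     and dict.fromkeys dedups symbols so no character is expanded twice.
--     """
--     result = string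
--     for c in dict.fromkeys(symbols):
--         if c.isalpha():
--             result = result.replace(c, c * 2)
--         elif c.isdigit():
--             result = result.replace(c, c * 3)
--     return result
-- ===== Notes on version B (the rewrite author's own statement) =====
-- stated objective: alternative
-- what changed: B rewrites the whole string by repeated str.replace passes, one per distinct symbol (deduped with dict.fromkeys), instead of A's single per-character scan that tests 'char in symbols' with isalpha/isdigit branches while joining pieces.
import Mathlib
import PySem

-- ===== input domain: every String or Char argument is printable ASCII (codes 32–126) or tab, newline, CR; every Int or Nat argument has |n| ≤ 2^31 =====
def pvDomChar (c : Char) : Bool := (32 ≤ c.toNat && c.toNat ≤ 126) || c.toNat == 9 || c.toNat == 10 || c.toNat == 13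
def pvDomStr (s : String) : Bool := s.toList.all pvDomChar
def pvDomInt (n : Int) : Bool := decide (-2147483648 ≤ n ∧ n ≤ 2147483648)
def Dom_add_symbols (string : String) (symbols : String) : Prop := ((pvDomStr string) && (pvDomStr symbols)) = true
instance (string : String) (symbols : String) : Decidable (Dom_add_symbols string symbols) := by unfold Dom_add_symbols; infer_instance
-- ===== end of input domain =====

-- B edits the string with one str.replace pass per distinct symbol instead of A's per-character scan with membership tests (alternative algorithm, same result).

-- ===== PORT A =====
-- for char in string: append char*2 / char*3 / char by the isalpha/isdigit + membership branches; ''.join(result)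
def add_symbols (string : String) (symbols : String) : String :=
  let result : List (List Char) :=
    string.toList.foldl (fun acc c =>
      if PySem.Chars.isalpha c && PySem.Chars.isIn [c] symbols.toList then
        acc ++ [[c, c]]
      else if PySem.Chars.isdigit c && PySem.Chars.isIn [c] symbols.toList then
        acc ++ [[c, c, c]]
      else
        acc ++ [[c]]) []
  String.ofList (PySem.Chars.join [] result)

-- ===== PORT B =====
-- result = string; for c in dict.fromkeys(symbols): result = result.replace(c, c*2) (alpha) / result.replace(c, c*3) (digit); return result
def add_symbols_alt (string : String) (symbols : String) : String :=
  String.ofList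
    ((PySem.List.dedup symbols.toList).foldl (fun res c =>
      if PySem.Chars.isalpha c then PySem.Chars.replace res [c] [c, c]
      else if PySem.Chars.isdigit c then PySem.Chars.replace res [c] [c, c, c]
      else res) string.toList)

-- ===== PRECONDITION & SPEC =====
def Spec_add_symbols (string : String) (symbols : String) (out : String) : Prop := out = add_symbols_alt string symbols
instance (string : String) (symbols : String) (out : String) : Decidable (Spec_add_symbols string symbols out) := by unfold Spec_add_symbols; infer_instance

-- ===== CLAIM (what is proved, stated in full; the proofs are below) =====
def Claim_equal_add_symbols : Prop := ∀ (string : String) (symbols : String), Dom_add_symbols string symbols → Spec_add_symbols string symbols (add_symbols string symbols)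

-- ===== LEMMAS AND PROOFS =====

-- the per-character expansion both programs realise, relative to a set S of active symbols
def pvExpand (S : List Char) (c : Char) : List Char :=
  if PySem.Chars.isalpha c && S.contains c then [c, c]
  else if PySem.Chars.isdigit c && S.contains c then [c, c, c]
  else [c]

-- every character of an expansion piece is the character it came from
theorem mem_pvExpand (S : List Char) (c d : Char) (h : d ∈ pvExpand S c) : d = c := by
  unfold pvExpand at h
  split_ifs at h <;> simp_all

-- single-char substring test = list membership
theorem isIn_singleton (c : Char) (l : List Char) :
    PySem.Chars.isIn [c] l = l.contains c := by
  by_cases h : c ∈ l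
  · rw [List.contains_eq_mem]
    simp only [h, decide_true]
    rw [PySem.Chars.isIn_iff_infix]
    obtain ⟨s, t, rfl⟩ := List.append_of_mem h
    exact ⟨s, t, by simp⟩
  · rw [List.contains_eq_mem]
    simp only [h, decide_false]
    rw [PySem.Chars.isIn_eq_false_iff]
    intro hinf
    exact h (hinf.subset (List.mem_singleton_self c))

-- Python's replace with a single-character pattern acts character by character
theorem replace_go_singleton (c0 : Char) (rep : List Char) (l : List Char)
    (fuel : Nat) (hf : l.length ≤ fuel) (acc : List Char) :
    PySem.Chars.replace.go [c0] rep fuel l acc =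
      acc.reverse ++ l.flatMap (fun c => if c = c0 then rep else [c]) := by
  induction l generalizing fuel acc with
  | nil => cases fuel <;> simp [PySem.Chars.replace.go]
  | cons c t ih =>
    cases fuel with
    | zero => simp at hf
    | succ fuel =>
      by_cases hc : c = c0
      · subst hc
        have hpre : List.isPrefixOf [c] (c :: t) = true := by simp [List.isPrefixOf]
        simp only [PySem.Chars.replace.go, hpre, if_true, List.length_cons, List.drop_succ_cons,
          List.length_nil, List.drop_zero]
        rw [ih fuel (by simpa using hf) (rep.reverse ++ acc)]
        simp
      · have hpre : List.isPrefixOf [c0] (c :: t) = false := by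
          simp only [List.isPrefixOf, Bool.and_eq_false_iff, beq_eq_false_iff_ne, ne_eq]
          left; exact fun h => hc h.symm
        simp only [PySem.Chars.replace.go, hpre, Bool.false_eq_true, if_false]
        rw [ih fuel (by simpa using hf) (c :: acc)]
        simp [hc]

theorem replace_singleton (c0 : Char) (rep : List Char) (l : List Char) :
    PySem.Chars.replace l [c0] rep =
      l.flatMap (fun c => if c = c0 then rep else [c]) := by
  unfold PySem.Chars.replace
  simp only [List.isEmpty_cons, Bool.false_eq_true, if_false]
  exact replace_go_singleton c0 rep l l.length le_rfl []

-- a replace pass for a symbol c0 not yet active rewrites the expanded string to the expansion with c0's piece rep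
theorem replace_flatMap_expand (l : List Char) (S : List Char) (c0 : Char) (rep : List Char)
    (hS : c0 ∉ S) :
    PySem.Chars.replace (l.flatMap (pvExpand S)) [c0] rep =
      l.flatMap (fun c => if c = c0 then rep else pvExpand S c) := by
  rw [replace_singleton, List.flatMap_assoc]
  congr 1
  funext c
  by_cases hc : c = c0
  · subst hc
    have hS' : S.contains c = false := by
      rw [List.contains_eq_mem]; simpa using hS
    simp [pvExpand, hS]
  · have : ∀ d ∈ pvExpand S c, (if d = c0 then rep else [d]) = [d] := by
      intro d hd
      rw [mem_pvExpand S c d hd, if_neg hc]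
    rw [List.flatMap_congr this, List.flatMap_singleton', if_neg hc]

-- B's loop over a duplicate-free list of fresh symbols activates exactly those symbols
theorem loop_expand (syms : List Char) (S : List Char) (l : List Char)
    (hfresh : ∀ c ∈ syms, c ∉ S) (hnd : syms.Nodup) :
    syms.foldl (fun res c =>
      if PySem.Chars.isalpha c then PySem.Chars.replace res [c] [c, c]
      else if PySem.Chars.isdigit c then PySem.Chars.replace res [c] [c, c, c]
      else res) (l.flatMap (pvExpand S)) = l.flatMap (pvExpand (S ++ syms)) := by
  induction syms generalizing S with
  | nil => simp
  | cons s rest ih =>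
    have hsS : s ∉ S := hfresh s (List.mem_cons_self)
    have hstep : (if PySem.Chars.isalpha s then PySem.Chars.replace (l.flatMap (pvExpand S)) [s] [s, s]
        else if PySem.Chars.isdigit s then PySem.Chars.replace (l.flatMap (pvExpand S)) [s] [s, s, s]
        else l.flatMap (pvExpand S)) = l.flatMap (pvExpand (S ++ [s])) := by
      have hcontains : ∀ c : Char, c ≠ s → (S ++ [s]).contains c = S.contains c := by
        intro c hc
        simp [List.contains_eq_mem, hc]
      by_cases ha : PySem.Chars.isalpha s
      · rw [if_pos ha, replace_flatMap_expand l S s [s, s] hsS]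
        congr 1; funext c
        by_cases hc : c = s
        · subst hc; simp [pvExpand, ha]
        · simp [pvExpand, hc]
      · by_cases hd : PySem.Chars.isdigit s
        · rw [if_neg ha, if_pos hd, replace_flatMap_expand l S s [s, s, s] hsS]
          congr 1; funext c
          by_cases hc : c = s
          · subst hc; simp [pvExpand, ha, hd]
          · simp [pvExpand, hc]
        · rw [if_neg ha, if_neg hd]
          congr 1; funext c
          by_cases hc : c = s
          · subst hc; simp [pvExpand, ha, hd]
          · simp [pvExpand, hc]
    have hnds := List.nodup_cons.mp hnd
    rw [List.foldl_cons, hstep, ih (S ++ [s])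
      (by intro c hc
          simp only [List.mem_append, List.mem_singleton, not_or]
          exact ⟨hfresh c (List.mem_cons_of_mem _ hc), fun h => hnds.1 (h ▸ hc)⟩)
      hnds.2]
    simp [List.append_assoc]

-- joining with the empty separator is flattening
theorem join_nil_eq_flatten (parts : List (List Char)) :
    PySem.Chars.join [] parts = parts.flatten := by
  induction parts with
  | nil => simp [PySem.Chars.join_nil]
  | cons p rest ih =>
    cases rest with
    | nil => simp [PySem.Chars.join_singleton]
    | cons q t =>
      rw [PySem.Chars.join_cons_cons]
      simp [ih]

-- ===== VERDICT (by name: the statement is the Claim_ definition above) =====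
theorem add_symbols_spec : Claim_equal_add_symbols := by
  intro string symbols _
  unfold Spec_add_symbols add_symbols add_symbols_alt
  simp only []
  congr 1
  -- A side: foldl of appended pieces = flatMap of the full expansion
  have hA : string.toList.foldl (fun acc c =>
      if PySem.Chars.isalpha c && PySem.Chars.isIn [c] symbols.toList then acc ++ [[c, c]]
      else if PySem.Chars.isdigit c && PySem.Chars.isIn [c] symbols.toList then acc ++ [[c, c, c]]
      else acc ++ [[c]]) [] =
      string.toList.map (fun c => pvExpand symbols.toList c) := by
    have hfun : (fun (acc : List (List Char)) (c : Char) =>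
        if (PySem.Chars.isalpha c && PySem.Chars.isIn [c] symbols.toList) = true then acc ++ [[c, c]]
        else if (PySem.Chars.isdigit c && PySem.Chars.isIn [c] symbols.toList) = true then acc ++ [[c, c, c]]
        else acc ++ [[c]]) =
        (fun (acc : List (List Char)) (c : Char) => acc ++ [pvExpand symbols.toList c]) := by
      funext acc c
      unfold pvExpand
      rw [isIn_singleton c symbols.toList]
      split_ifs <;> rfl
    rw [hfun, PySem.List.foldl_append_singleton_eq_map]
    simp
  rw [hA, join_nil_eq_flatten, ← List.flatMap_def]
  -- B side: start from the trivial expansion and run the loop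
  have h0 : string.toList.flatMap (pvExpand ([] : List Char)) = string.toList := by
    have he : pvExpand ([] : List Char) = fun c => [c] := by funext c; simp [pvExpand]
    rw [he, List.flatMap_singleton']
  have hB := loop_expand (PySem.List.dedup symbols.toList) [] string.toList
      (by intro c _; simp) (PySem.List.nodup_dedup symbols.toList)
  rw [h0] at hB
  rw [hB]
  congr 1
  funext c
  have : (([] : List Char) ++ PySem.List.dedup symbols.toList).contains c = symbols.toList.contains c := by
    simp only [List.nil_append, List.contains_eq_mem]
    simp
  simp only [pvExpand, this]
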